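-- pv_equiv track=rewrite | github.com/VishwajeetEkal/CSCI-B505-Applied-Algorithms | Assignment 5/QUE06.py | isRearrangePossible
-- ===== SOURCE A (Python) =====
-- def customHeapify(arrayToHeapify):
--     lengthArray = len(arrayToHeapify)
--
--     selectElment = (lengthArray - 1) // 2
--     while selectElment >= 0:
--         customMaxHeapify(arrayToHeapify, selectElment, lengthArray)
--         selectElment -= 1
--
-- def customMaxHeapify(arrayToHeapify, selectElment, lengthArray):
--     rootElement = selectElment
--     leftChild = 2 * selectElment + 1
--     rightChild = 2 * selectElment + 2
--
--     if leftChild < lengthArray and arrayToHeapify[leftChild][0] > arrayToHeapify[rootElement][0]: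
--         rootElement = leftChild
--
--     if rightChild < lengthArray and arrayToHeapify[rightChild][0] > arrayToHeapify[rootElement][0]:
--         rootElement = rightChild
--
--     if rootElement != selectElment:
--         arrayToHeapify[selectElment], arrayToHeapify[rootElement] = arrayToHeapify[rootElement], arrayToHeapify[selectElment]
--         customMaxHeapify(arrayToHeapify, rootElement, lengthArray)
--
-- def customHeappop(arrayToHeapify):
--     root = arrayToHeapify[0]
--     arrayToHeapify[0] = arrayToHeapify[-1]
--     arrayToHeapify.pop()
--     customMaxHeapify(arrayToHeapify, 0, len(arrayToHeapify))
--     return root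
--
-- def customHeappush(arrayToHeapify, pushElement):
--     arrayToHeapify.append(pushElement)
--     selectElement = len(arrayToHeapify) - 1
--     while selectElement > 0:
--         parent = (selectElement - 1) // 2
--         if arrayToHeapify[selectElement][0] > arrayToHeapify[parent][0]:
--             arrayToHeapify[selectElement], arrayToHeapify[parent] = arrayToHeapify[parent], arrayToHeapify[selectElement]
--             selectElement = parent
--         else:
--             break
--
-- def isRearrangePossible(s, k):
--
--     magicalCountsDict = {}
--     for char in s:
--         if char not in magicalCountsDict:
--             magicalCountsDict[char] = 1
--         else:
--             magicalCountsDict[char] += 1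
--
--     if len(magicalCountsDict) == 1:
--         return False
--
--     maxHeapMagical = [(countMagiacl, char) for char, countMagiacl in magicalCountsDict.items()]
--     customHeapify(maxHeapMagical)
--
--     elementsNotINHeap = []
--     rearrangedString = []
--     while maxHeapMagical:
--         countMagical, magical = customHeappop(maxHeapMagical)
--         rearrangedString.append(magical)
--         elementsNotINHeap.append((countMagical-1, magical))
--
--         if len(elementsNotINHeap) == k:
--             freqMagical, char = elementsNotINHeap.pop(0)
--             if freqMagical > 0:
--                 customHeappush(maxHeapMagical,(freqMagical, char))
--
--
--     return len(rearrangedString) == len(s)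
-- ===== SOURCE B (Python) =====
-- def isRearrangePossible(s, k):
--     counts = {}
--     for ch in s:
--         counts[ch] = counts.get(ch, 0) + 1
--     if len(counts) == 1:
--         return False
--     pool = list(counts.values())
--     wait = []
--     done = 0
--     while pool:
--         m = max(pool)
--         pool.remove(m)
--         done += 1
--         wait.append(m - 1)
--         if len(wait) == k:
--             f = wait.pop(0)
--             if f > 0:
--                 pool.append(f)
--     return done == len(s)
-- ===== Notes on version B (the rewrite author's own statement) =====
-- stated objective: simpler
-- what changed: B drops the 60-line hand-rolled binary max-heap (heapify/sift/push/pop) and the rebuilt character list: it counts frequencies into a dict, then runs the cooldown loop directly on a plain list of counts, selecting each step's maximum by a linear scan and keeping only an emission counter.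
import Mathlib
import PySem

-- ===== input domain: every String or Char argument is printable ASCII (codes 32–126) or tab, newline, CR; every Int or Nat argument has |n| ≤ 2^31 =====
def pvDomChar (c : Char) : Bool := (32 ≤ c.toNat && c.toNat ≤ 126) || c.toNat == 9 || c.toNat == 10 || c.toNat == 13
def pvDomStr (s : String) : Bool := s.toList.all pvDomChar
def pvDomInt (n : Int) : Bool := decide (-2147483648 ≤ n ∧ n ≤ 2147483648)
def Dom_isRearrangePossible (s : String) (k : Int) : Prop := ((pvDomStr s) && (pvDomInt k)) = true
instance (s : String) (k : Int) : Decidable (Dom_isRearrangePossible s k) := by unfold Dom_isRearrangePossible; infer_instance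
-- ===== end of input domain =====

-- B replaces A's hand-rolled binary max-heap and rebuilt character list by a linear max-scan
-- over a plain list of counts with an emission counter (objective: simpler).

-- ===== PORT A =====
-- arr[i] with a default; every access A makes is guarded in range, where pyGet? is exact
def pvAt (l : List (Int × Char)) (i : Int) : Int × Char := (PySem.List.pyGet? l i).getD (0, ' ')

-- arr[i], arr[j] = arr[j], arr[i]  (rhs read first, then assigned left to right)
def pvSwap (l : List (Int × Char)) (i j : Int) : List (Int × Char) :=
  PySem.List.pySetD (PySem.List.pySetD l i (pvAt l j)) j (pvAt l i)

-- customMaxHeapify; fuel only bounds the sift-down recursion depth (A's calls always stay within it)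
def customMaxHeapify (fuel : Nat) (arr : List (Int × Char)) (selectElment lengthArray : Int) :
    List (Int × Char) :=
  match fuel with
  | 0 => arr
  | fuel + 1 =>
    let rootElement := selectElment
    let leftChild := 2 * selectElment + 1
    let rightChild := 2 * selectElment + 2
    let rootElement :=
      if leftChild < lengthArray ∧ (pvAt arr leftChild).1 > (pvAt arr rootElement).1 then leftChild
      else rootElement
    let rootElement :=
      if rightChild < lengthArray ∧ (pvAt arr rightChild).1 > (pvAt arr rootElement).1 then rightChild
      else rootElement
    if rootElement ≠ selectElment then
      customMaxHeapify fuel (pvSwap arr selectElment rootElement) rootElement lengthArray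
    else arr

-- while selectElment >= 0 loop of customHeapify (fuel bounds the countdown, always sufficient)
def customHeapifyLoop (fuel : Nat) (arr : List (Int × Char)) (selectElment lengthArray : Int) :
    List (Int × Char) :=
  match fuel with
  | 0 => arr
  | fuel + 1 =>
    if 0 ≤ selectElment then
      customHeapifyLoop fuel (customMaxHeapify (arr.length + 1) arr selectElment lengthArray)
        (selectElment - 1) lengthArray
    else arr

def customHeapify (arr : List (Int × Char)) : List (Int × Char) :=
  let lengthArray : Int := PySem.List.len arr
  customHeapifyLoop (arr.length + 1) arr (PySem.Int.floordiv (lengthArray - 1) 2) lengthArray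

-- customHeappop; A only calls it on a nonempty heap, where arr[0], arr[-1] and .pop() are exact
def customHeappop (arr : List (Int × Char)) : (Int × Char) × List (Int × Char) :=
  let root := pvAt arr 0
  let arr1 := PySem.List.pySetD arr 0 (pvAt arr (-1))
  let arr2 := arr1.dropLast
  (root, customMaxHeapify (arr2.length + 1) arr2 0 (PySem.List.len arr2))

-- while selectElement > 0 loop of customHeappush (fuel bounds the climb, always sufficient)
def customHeappushLoop (fuel : Nat) (arr : List (Int × Char)) (selectElement : Int) :
    List (Int × Char) :=
  match fuel with
  | 0 => arr
  | fuel + 1 =>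
    if 0 < selectElement then
      let parent := PySem.Int.floordiv (selectElement - 1) 2
      if (pvAt arr selectElement).1 > (pvAt arr parent).1 then
        customHeappushLoop fuel (pvSwap arr selectElement parent) parent
      else arr
    else arr

def customHeappush (arr : List (Int × Char)) (pushElement : Int × Char) : List (Int × Char) :=
  let arr1 := arr ++ [pushElement]
  customHeappushLoop (arr1.length + 1) arr1 ((arr1.length : Int) - 1)

-- the main while loop of A; fuel bounds the iteration count (≤ len(s), always sufficient)
def pvLoopA (fuel : Nat) (heap : List (Int × Char)) (q : List (Int × Char)) (out : List Char)
    (k : Int) : List Char :=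
  match fuel with
  | 0 => out
  | fuel + 1 =>
    if heap.isEmpty then out
    else
      let p := customHeappop heap
      let out1 := out ++ [p.1.2]
      let q1 := q ++ [(p.1.1 - 1, p.1.2)]
      if (q1.length : Int) = k then
        match q1 with
        | [] => out1  -- unreachable: q1 ends in an appended element
        | f :: rest =>
          if f.1 > 0 then pvLoopA fuel (customHeappush p.2 f) rest out1 k
          else pvLoopA fuel p.2 rest out1 k
      else pvLoopA fuel p.2 q1 out1 k

def isRearrangePossible (s : String) (k : Int) : Bool :=
  let counts := s.toList.foldl
    (fun d c => if ¬ PySem.Dict.contains d c then d.insert c 1 else d.insert c (d.getD c 0 + 1))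
    PySem.Dict.empty
  if counts.size = 1 then false
  else
    let heap0 := counts.items.map (fun p => (p.2, p.1))
    let heap1 := customHeapify heap0
    let out := pvLoopA (s.toList.length + 1) heap1 [] [] k
    decide ((out.length : Int) = PySem.Str.len s)

-- ===== PORT B =====
-- the while loop of B: a list of counts, a cooldown queue and an emission counter;
-- fuel bounds the iteration count (≤ len(s), always sufficient)
def pvLoopB (fuel : Nat) (pool : List Int) (wait : List Int) (done : Int) (k : Int) : Int :=
  match fuel with
  | 0 => done
  | fuel + 1 =>
    if pool.isEmpty then done
    else
      let m := (PySem.List.max? pool id).getD 0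
      let pool1 := (PySem.List.remove? pool m).getD pool
      let done1 := done + 1
      let wait1 := wait ++ [m - 1]
      if (wait1.length : Int) = k then
        match wait1 with
        | [] => done1  -- unreachable: wait1 ends in an appended element
        | f :: rest =>
          if f > 0 then pvLoopB fuel (pool1 ++ [f]) rest done1 k
          else pvLoopB fuel pool1 rest done1 k
      else pvLoopB fuel pool1 wait1 done1 k

def isRearrangePossible_alt (s : String) (k : Int) : Bool :=
  let counts := s.toList.foldl (fun d c => d.insert c (d.getD c 0 + 1)) PySem.Dict.empty
  if counts.size = 1 then false
  else
    let done := pvLoopB (s.toList.length + 1) counts.values [] 0 k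
    decide (done = PySem.Str.len s)

-- ===== PRECONDITION & SPEC =====
def Spec_isRearrangePossible (s : String) (k : Int) (out : Bool) : Prop := out = isRearrangePossible_alt s k
instance (s : String) (k : Int) (out : Bool) : Decidable (Spec_isRearrangePossible s k out) := by unfold Spec_isRearrangePossible; infer_instance

-- ===== CLAIM (what is proved, stated in full; the proofs are below) =====
def Claim_equal_isRearrangePossible : Prop := ∀ (s : String) (k : Int), Dom_isRearrangePossible s k → Spec_isRearrangePossible s k (isRearrangePossible s k)

-- ===== LEMMAS AND PROOFS =====

-- key of the element at Nat index i (out of range: the default)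
def pvK (l : List (Int × Char)) (i : Nat) : Int := (l[i]?.getD (0, ' ')).1

-- the binary-heap order holds at every node of index ≥ i
def pvHeapFrom (l : List (Int × Char)) (i : Nat) : Prop :=
  ∀ p j : Nat, i ≤ p → (j = 2 * p + 1 ∨ j = 2 * p + 2) → j < l.length → pvK l j ≤ pvK l p

-- Nat-index form of pvSwap
def pvSwapN (l : List (Int × Char)) (a b : Nat) : List (Int × Char) :=
  (l.set a (l[b]?.getD (0, ' '))).set b (l[a]?.getD (0, ' '))

theorem pvAt_nonneg (l : List (Int × Char)) (i : Int) (h : 0 ≤ i) :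
    pvAt l i = l[i.toNat]?.getD (0, ' ') := by
  simp [pvAt, PySem.List.pyGet?_of_nonneg l h]
theorem pvAt_fst (l : List (Int × Char)) (i : Int) (h : 0 ≤ i) :
    (pvAt l i).1 = pvK l i.toNat := by
  rw [pvAt_nonneg l i h, pvK]
theorem pvSwap_eq (l : List (Int × Char)) (i j : Int) (hi : 0 ≤ i) (hj : 0 ≤ j) :
    pvSwap l i j = pvSwapN l i.toNat j.toNat := by
  simp [pvSwap, pvSwapN, pvAt_nonneg _ _ hi, pvAt_nonneg _ _ hj,
    PySem.List.pySetD_of_nonneg _ _ hi, PySem.List.pySetD_of_nonneg _ _ hj]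
theorem length_pvSwapN (l : List (Int × Char)) (a b : Nat) :
    (pvSwapN l a b).length = l.length := by simp [pvSwapN]
theorem pvSwapN_perm (l : List (Int × Char)) (a b : Nat) (ha : a < l.length)
    (hb : b < l.length) : (pvSwapN l a b).Perm l := by
  rcases eq_or_ne a b with rfl | hab
  · simp [pvSwapN, List.getElem?_eq_getElem ha, List.set_getElem_self]
  · rw [List.perm_iff_count]
    intro x
    have h1 : a < (l.set a (l[b]?.getD (0,' '))).length := by simpa using ha
    have hbl : b < (l.set a (l[b]?.getD (0,' '))).length := by simpa using hb
    rw [pvSwapN, List.count_set hbl, List.count_set ha]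
    have hsa : (l.set a (l[b]?.getD (0,' ')))[b] = l[b] := by
      rw [List.getElem_set]; simp [hab]
    have hca : List.count l[a] l ≥ 1 := List.count_pos_iff.mpr (l.getElem_mem ha)
    have hcb : List.count l[b] l ≥ 1 := List.count_pos_iff.mpr (l.getElem_mem hb)
    rw [hsa]
    simp only [List.getElem?_eq_getElem ha, List.getElem?_eq_getElem hb, Option.getD_some]
    by_cases e1 : l[a] = x <;> by_cases e2 : l[b] = x <;>
      · subst_eqs <;> simp_all <;> omega
theorem pvK_pvSwapN (l : List (Int × Char)) (a b : Nat) (ha : a < l.length) (hb : b < l.length)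
    (hab : a ≠ b) (m : Nat) :
    pvK (pvSwapN l a b) m = if m = b then pvK l a else if m = a then pvK l b else pvK l m := by
  unfold pvK pvSwapN
  rw [List.getElem?_set, List.getElem?_set]
  simp only [List.length_set]
  rcases eq_or_ne m b with rfl | h2 <;> rcases eq_or_ne m a with rfl | h3 <;>
    simp_all [List.getElem?_eq_getElem ha, List.getElem?_eq_getElem hb, eq_comm]

def pvSiftGood (fuel : Nat) : Prop :=
  ∀ (l : List (Int × Char)) (sel : Int) (i0 : Nat),
    0 ≤ sel → sel.toNat < l.length → i0 ≤ sel.toNat → l.length ≤ fuel + sel.toNat →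
    (∀ p j : Nat, i0 ≤ p → p ≠ sel.toNat → (j = 2*p+1 ∨ j = 2*p+2) → j < l.length →
      pvK l j ≤ pvK l p) →
    (sel.toNat ≠ i0 → ∀ j : Nat, (j = 2*sel.toNat+1 ∨ j = 2*sel.toNat+2) → j < l.length →
      pvK l j ≤ pvK l ((sel.toNat-1)/2)) →
    (customMaxHeapify fuel l sel (l.length : Int)).Perm l ∧
      pvHeapFrom (customMaxHeapify fuel l sel (l.length : Int)) i0

theorem sift_step (fuel : Nat) (ih : pvSiftGood fuel) (l : List (Int × Char)) (sel c : Int)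
    (i0 : Nat)
    (h0 : 0 ≤ sel) (h1 : sel.toNat < l.length) (h2 : i0 ≤ sel.toNat)
    (h3 : l.length ≤ (fuel+1) + sel.toNat)
    (H1 : ∀ p j : Nat, i0 ≤ p → p ≠ sel.toNat → (j = 2*p+1 ∨ j = 2*p+2) → j < l.length →
      pvK l j ≤ pvK l p)
    (H2 : sel.toNat ≠ i0 → ∀ j : Nat, (j = 2*sel.toNat+1 ∨ j = 2*sel.toNat+2) → j < l.length →
      pvK l j ≤ pvK l ((sel.toNat-1)/2))
    (hc : c = 2*sel+1 ∨ c = 2*sel+2) (hcn : c.toNat < l.length)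
    (hgt : pvK l sel.toNat < pvK l c.toNat)
    (hmax : ∀ j : Nat, (j = 2*sel.toNat+1 ∨ j = 2*sel.toNat+2) → j < l.length →
      pvK l j ≤ pvK l c.toNat) :
    (customMaxHeapify fuel (pvSwap l sel c) c (l.length : Int)).Perm l ∧
      pvHeapFrom (customMaxHeapify fuel (pvSwap l sel c) c (l.length : Int)) i0 := by
  set S := sel.toNat with hS
  set C := c.toNat with hC
  have hc0 : 0 ≤ c := by omega
  have hCS : C = 2*S+1 ∨ C = 2*S+2 := by omega
  have hSC : S ≠ C := by omega
  have hswap : pvSwap l sel c = pvSwapN l S C := pvSwap_eq l sel c h0 hc0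
  have hlen : (pvSwapN l S C).length = l.length := length_pvSwapN l S C
  have hKs : ∀ m, pvK (pvSwapN l S C) m
      = if m = C then pvK l S else if m = S then pvK l C else pvK l m :=
    pvK_pvSwapN l S C h1 hcn hSC
  rw [hswap]
  have hlen' : ((l.length : Int)) = ((pvSwapN l S C).length : Int) := by rw [hlen]
  rw [hlen']
  have hmain := ih (pvSwapN l S C) c i0 hc0 (by rw [hlen]; exact hcn) (by omega)
    (by rw [hlen]; omega) ?H1' ?H2'
  · exact ⟨hmain.1.trans (pvSwapN_perm l S C h1 hcn), hmain.2⟩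
  case H1' =>
    intro p j hpi hpc hedge hjlen
    rw [hlen] at hjlen
    rw [hKs, hKs]
    rcases eq_or_ne p S with rfl | hpS
    · have hjS : j ≠ S := by omega
      rw [if_neg (by omega : ¬ (S = C)), if_pos rfl]
      by_cases hjC : j = C
      · rw [if_pos hjC]; exact le_of_lt hgt
      · rw [if_neg hjC, if_neg hjS]
        exact hmax j (by omega) hjlen
    · rw [if_neg hpc, if_neg hpS]
      by_cases hjS : j = S
      · subst hjS
        have hSpos : 1 ≤ S := by omega
        have hp : p = (S-1)/2 := by omega
        have hSi0 : S ≠ i0 := by omega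
        rw [if_neg (by omega : ¬ (S = C)), if_pos rfl]
        have hh := H2 hSi0 C hCS (by omega)
        rwa [← hp] at hh
      · have hjC : j ≠ C := by omega
        rw [if_neg hjC, if_neg hjS]
        exact H1 p j hpi hpS hedge hjlen
  case H2' =>
    intro hCi0 j hedge hjlen
    rw [hlen] at hjlen
    rw [hKs, hKs]
    have hpar : (C-1)/2 = S := by omega
    rw [hpar]
    have hjC : j ≠ C := by omega
    have hjS : j ≠ S := by omega
    rw [if_neg hjC, if_neg hjS, if_neg (by omega : ¬ (S = C)), if_pos rfl]
    exact H1 C j (by omega) (by omega) (by omega) hjlen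

theorem sift_spec : ∀ fuel, pvSiftGood fuel := by
  intro fuel
  induction fuel with
  | zero =>
    intro l sel i0 h0 h1 h2 h3 H1 H2
    exact absurd h3 (by omega)
  | succ fuel ih =>
    intro l sel i0 h0 h1 h2 h3 H1 H2
    have tL : (2*sel+1).toNat = 2*sel.toNat+1 := by omega
    have tR : (2*sel+2).toNat = 2*sel.toNat+2 := by omega
    have kL : (pvAt l (2*sel+1)).1 = pvK l (2*sel.toNat+1) := by
      rw [pvAt_fst l _ (by omega : (0:Int) ≤ 2*sel+1), tL]
    have kR : (pvAt l (2*sel+2)).1 = pvK l (2*sel.toNat+2) := by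
      rw [pvAt_fst l _ (by omega : (0:Int) ≤ 2*sel+2), tR]
    have kS : (pvAt l sel).1 = pvK l sel.toNat := pvAt_fst l sel h0
    simp only [customMaxHeapify]
    by_cases hL : 2*sel+1 < (l.length:Int) ∧ (pvAt l (2*sel+1)).1 > (pvAt l sel).1
    · rw [if_pos hL]
      rw [kL, kS] at hL
      by_cases hR : 2*sel+2 < (l.length:Int) ∧ (pvAt l (2*sel+2)).1 > (pvAt l (2*sel+1)).1
      · rw [if_pos hR, if_pos (by omega : 2*sel+2 ≠ sel)]
        rw [kR, kL] at hR
        exact sift_step fuel ih l sel (2*sel+2) i0 h0 h1 h2 h3 H1 H2 (Or.inr rfl)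
          (by omega) (by rw [tR]; omega)
          (by intro j hj hjl; rw [tR]; rcases hj with rfl | rfl <;> omega)
      · rw [if_neg hR, if_pos (by omega : 2*sel+1 ≠ sel)]
        rw [kR, kL] at hR
        exact sift_step fuel ih l sel (2*sel+1) i0 h0 h1 h2 h3 H1 H2 (Or.inl rfl)
          (by omega) (by rw [tL]; omega)
          (by intro j hj hjl; rw [tL]
              rcases hj with rfl | rfl
              · omega
              · rcases not_and_or.mp hR with h | h <;> omega)
    · rw [if_neg hL]
      rw [kL, kS] at hL
      by_cases hR : 2*sel+2 < (l.length:Int) ∧ (pvAt l (2*sel+2)).1 > (pvAt l sel).1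
      · rw [if_pos hR, if_pos (by omega : 2*sel+2 ≠ sel)]
        rw [kR, kS] at hR
        exact sift_step fuel ih l sel (2*sel+2) i0 h0 h1 h2 h3 H1 H2 (Or.inr rfl)
          (by omega) (by rw [tR]; omega)
          (by intro j hj hjl; rw [tR]
              rcases hj with rfl | rfl
              · rcases not_and_or.mp hL with h | h <;> omega
              · omega)
      · rw [if_neg hR, if_neg (by omega : ¬ (sel ≠ sel))]
        rw [kR, kS] at hR
        refine ⟨List.Perm.refl l, ?_⟩
        intro p j hpi hedge hjlen
        rcases eq_or_ne p sel.toNat with rfl | hpS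
        · rcases hedge with rfl | rfl
          · rcases not_and_or.mp hL with h | h <;> omega
          · rcases not_and_or.mp hR with h | h <;> omega
        · exact H1 p j hpi hpS hedge hjlen

theorem pvK_le_root (l : List (Int × Char)) (h : pvHeapFrom l 0) :
    ∀ j : Nat, j < l.length → pvK l j ≤ pvK l 0 := by
  intro j
  induction j using Nat.strong_induction_on with
  | _ j ih =>
    intro hj
    rcases Nat.eq_zero_or_pos j with rfl | hpos
    · exact le_refl _
    · have hedge : j = 2 * ((j-1)/2) + 1 ∨ j = 2 * ((j-1)/2) + 2 := by omega
      calc pvK l j ≤ pvK l ((j-1)/2) := h _ j (Nat.zero_le _) hedge hj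
        _ ≤ pvK l 0 := ih _ (by omega) (by omega)

theorem fst_le_root (l : List (Int × Char)) (h : pvHeapFrom l 0) (x : Int × Char) (hx : x ∈ l) :
    x.1 ≤ pvK l 0 := by
  obtain ⟨j, hj, rfl⟩ := List.getElem_of_mem hx
  have := pvK_le_root l h j hj
  simpa [pvK, List.getElem?_eq_getElem hj] using this

theorem heapifyLoop_neg (fuel : Nat) (l : List (Int × Char)) (sel n : Int) (h : sel < 0) :
    customHeapifyLoop fuel l sel n = l := by
  cases fuel with
  | zero => rfl
  | succ f => simp only [customHeapifyLoop, if_neg (by omega : ¬ (0:Int) ≤ sel)]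

theorem heapifyLoop_spec : ∀ (fuel : Nat) (l : List (Int × Char)) (sel : Int),
    sel < (l.length : Int) → sel.toNat + 1 ≤ fuel →
    (∀ p j : Nat, sel < (p : Int) → (j = 2 * p + 1 ∨ j = 2 * p + 2) → j < l.length →
      pvK l j ≤ pvK l p) →
    (customHeapifyLoop fuel l sel (l.length : Int)).Perm l ∧
      pvHeapFrom (customHeapifyLoop fuel l sel (l.length : Int)) 0 := by
  intro fuel
  induction fuel with
  | zero => intro l sel h1 h2 H; omega
  | succ fuel ih =>
    intro l sel h1 h2 H
    by_cases hs : 0 ≤ sel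
    · simp only [customHeapifyLoop, if_pos hs]
      have hsift := sift_spec (l.length+1) l sel sel.toNat hs (by omega) (le_refl _) (by omega)
        (fun p j hpi hpne hedge hjl => H p j (by omega) hedge hjl)
        (fun habs => absurd rfl habs)
      set l' := customMaxHeapify (l.length+1) l sel (l.length : Int) with hl'
      have hlen' : l'.length = l.length := hsift.1.length_eq
      by_cases hneg : sel - 1 < 0
      · rw [heapifyLoop_neg fuel l' (sel-1) _ hneg]
        refine ⟨hsift.1, ?_⟩
        have h0 : sel.toNat = 0 := by omega
        rw [h0] at hsift
        exact hsift.2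
      · have hrec := ih l' (sel - 1) (by rw [hlen']; omega) (by omega)
          (by intro p j hpi hedge hjl
              exact hsift.2 p j (by omega) hedge hjl)
        rw [show ((l.length : Int)) = ((l'.length : Int)) by rw [hlen']]
        exact ⟨hrec.1.trans hsift.1, hrec.2⟩
    · simp only [customHeapifyLoop, if_neg hs]
      refine ⟨List.Perm.refl l, ?_⟩
      intro p j hpi hedge hjl
      exact H p j (by omega) hedge hjl

theorem customHeapify_spec (l : List (Int × Char)) :
    (customHeapify l).Perm l ∧ pvHeapFrom (customHeapify l) 0 := by
  have hd : PySem.Int.floordiv ((l.length : Int) - 1) 2 = ((l.length : Int) - 1) / 2 := by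
    rw [PySem.Int.floordiv_eq_ediv_of_pos (by omega)]
  simp only [customHeapify, PySem.List.len_eq, hd]
  apply heapifyLoop_spec
  · omega
  · omega
  · intro p j hpi hedge hjl
    omega

theorem pop_prep (l : List (Int × Char)) (hne : l ≠ []) :
    ((PySem.List.pySetD l 0 (pvAt l (-1))).dropLast).Perm l.tail ∧
    (∀ m : Nat, 1 ≤ m → m < ((PySem.List.pySetD l 0 (pvAt l (-1))).dropLast).length →
      pvK ((PySem.List.pySetD l 0 (pvAt l (-1))).dropLast) m = pvK l m) ∧
    ((PySem.List.pySetD l 0 (pvAt l (-1))).dropLast).length = l.length - 1 := by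
  have hv : pvAt l (-1) = l.getLast hne := by
    simp [pvAt, PySem.List.pyGet?_neg_one, List.getLast?_eq_getLast_of_ne_nil hne]
  have hset : PySem.List.pySetD l 0 (pvAt l (-1)) = l.set 0 (l.getLast hne) := by
    rw [hv, PySem.List.pySetD_of_nonneg l _ (by omega)]
    norm_num
  rw [hset]
  obtain ⟨a, t, rfl⟩ := List.exists_cons_of_ne_nil hne
  rw [List.set_cons_zero]
  refine ⟨?_, ?_, ?_⟩
  · cases t with
    | nil => simp
    | cons b t' =>
      rw [List.dropLast_cons₂]
      have hgl : (a :: b :: t').getLast hne = (b :: t').getLast (by simp) := by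
        rw [List.getLast_cons]
      rw [hgl, List.tail_cons]
      have hp : ((b :: t').getLast (by simp) :: (b :: t').dropLast).Perm
          ((b :: t').dropLast ++ [(b :: t').getLast (by simp)]) :=
        (List.perm_append_singleton _ _).symm
      refine hp.trans ?_
      rw [List.dropLast_append_getLast]
  · intro m hm hml
    unfold pvK
    rw [List.getElem?_dropLast]
    have hml' : m < ((a :: t).getLast hne :: t).length - 1 := by simpa using hml
    rw [if_pos hml']
    cases m with
    | zero => omega
    | succ m' => simp
  · simp

theorem customHeappop_spec (l : List (Int × Char)) (hne : l ≠ []) (h : pvHeapFrom l 0) :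
    (customHeappop l).1 = l.head hne ∧ ((customHeappop l).2).Perm l.tail ∧
      pvHeapFrom (customHeappop l).2 0 := by
  obtain ⟨hperm, hkeep, hlen⟩ := pop_prep l hne
  have hroot : pvAt l 0 = l.head hne := by
    obtain ⟨a, t, rfl⟩ := List.exists_cons_of_ne_nil hne
    simp [pvAt, PySem.List.pyGet?_zero_cons]
  simp only [customHeappop, PySem.List.len_eq]
  set arr2 := (PySem.List.pySetD l 0 (pvAt l (-1))).dropLast with harr2
  refine ⟨hroot, ?_⟩
  rcases eq_or_ne arr2 [] with h2 | h2
  · rw [h2]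
    have hv : customMaxHeapify (List.length ([] : List (Int × Char)) + 1)
        ([] : List (Int × Char)) 0 ((List.length ([] : List (Int × Char)) : Int)) = [] := rfl
    rw [hv]
    constructor
    · rw [h2] at hperm; exact hperm
    · intro p j hpi hedge hjl; simp at hjl
  · have hpos : 0 < arr2.length := List.length_pos_iff.mpr h2
    have hsift := sift_spec (arr2.length+1) arr2 0 0 (by omega) (by simpa using hpos)
      (by omega) (by omega) ?H1 (fun habs => absurd rfl habs)
    · exact ⟨hsift.1.trans hperm, hsift.2⟩
    case H1 =>
      intro p j hpi hpne hedge hjl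
      have hp2 : p < arr2.length := by omega
      rw [hkeep j (by omega) hjl, hkeep p (by omega) hp2]
      exact h p j (by omega) hedge (by omega)

def pvPushGood (fuel : Nat) : Prop :=
  ∀ (l : List (Int × Char)) (sel : Int),
    0 ≤ sel → sel.toNat < l.length → sel.toNat < fuel →
    (∀ p j : Nat, (j = 2*p+1 ∨ j = 2*p+2) → j < l.length → j ≠ sel.toNat →
      pvK l j ≤ pvK l p) →
    (0 < sel.toNat → ∀ j : Nat, (j = 2*sel.toNat+1 ∨ j = 2*sel.toNat+2) → j < l.length →
      pvK l j ≤ pvK l ((sel.toNat-1)/2)) →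
    (customHeappushLoop fuel l sel).Perm l ∧ pvHeapFrom (customHeappushLoop fuel l sel) 0

theorem pushLoop_spec : ∀ fuel, pvPushGood fuel := by
  intro fuel
  induction fuel with
  | zero => intro l sel h0 h1 h2 H1 H2; omega
  | succ fuel ih =>
    intro l sel h0 h1 h2 H1 H2
    simp only [customHeappushLoop]
    by_cases hs : 0 < sel
    · rw [if_pos hs]
      set S := sel.toNat with hS
      have hSpos : 0 < S := by omega
      have hfd : PySem.Int.floordiv (sel - 1) 2 = ((S - 1 : Nat) : Int) / 2 := by
        rw [PySem.Int.floordiv_eq_ediv_of_pos (by omega)]; omega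
      have htP : (PySem.Int.floordiv (sel - 1) 2).toNat = (S-1)/2 := by
        rw [hfd]; omega
      set P := (S-1)/2 with hP
      have hPS : P < S := by omega
      have kS : (pvAt l sel).1 = pvK l S := pvAt_fst l sel h0
      have kP : (pvAt l (PySem.Int.floordiv (sel - 1) 2)).1 = pvK l P := by
        rw [pvAt_fst l _ (by rw [hfd]; omega), htP]
      by_cases hgt : (pvAt l sel).1 > (pvAt l (PySem.Int.floordiv (sel - 1) 2)).1
      · rw [if_pos hgt]
        rw [kS, kP] at hgt
        have hswap : pvSwap l sel (PySem.Int.floordiv (sel - 1) 2) = pvSwapN l S P := by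
          rw [pvSwap_eq l _ _ h0 (by rw [hfd]; omega), htP]
        rw [hswap]
        have hKs : ∀ m, pvK (pvSwapN l S P) m
            = if m = P then pvK l S else if m = S then pvK l P else pvK l m :=
          pvK_pvSwapN l S P h1 (by omega) (by omega)
        have hrec := ih (pvSwapN l S P) (PySem.Int.floordiv (sel - 1) 2)
          (by rw [hfd]; omega) (by rw [htP, length_pvSwapN]; omega) (by rw [htP]; omega)
          ?H1' ?H2'
        · exact ⟨hrec.1.trans (pvSwapN_perm l S P h1 (by omega)), hrec.2⟩
        case H1' =>
          intro p j hedge hjl hjP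
          rw [length_pvSwapN] at hjl
          rw [htP] at hjP
          rw [hKs, hKs, if_neg hjP]
          by_cases hjS : j = S
          · subst hjS
            have hpP : p = P := by omega
            subst hpP
            rw [if_pos rfl, if_pos rfl]
            exact le_of_lt hgt
          · rw [if_neg hjS]
            rcases eq_or_ne p P with rfl | hpP
            · rw [if_pos rfl]
              calc pvK l j ≤ pvK l P := H1 P j hedge hjl hjS
                _ ≤ pvK l S := le_of_lt hgt
            · rw [if_neg hpP]
              rcases eq_or_ne p S with rfl | hpS
              · rw [if_pos rfl]
                exact H2 hSpos j (by omega) hjl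
              · rw [if_neg hpS]
                exact H1 p j hedge hjl hjS
        case H2' =>
          intro hPpos j hedge hjl
          rw [length_pvSwapN] at hjl
          rw [htP] at hPpos hedge ⊢
          rw [hKs, hKs]
          have hjP : j ≠ P := by omega
          have hGP : (P-1)/2 ≠ P := by omega
          have hGS : (P-1)/2 ≠ S := by omega
          have hedgeGP : P = 2*((P-1)/2)+1 ∨ P = 2*((P-1)/2)+2 := by omega
          rw [if_neg hjP, if_neg hGP, if_neg hGS]
          by_cases hjS : j = S
          · subst hjS
            rw [if_pos rfl]
            exact H1 ((P-1)/2) P hedgeGP (by omega) (by omega)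
          · rw [if_neg hjS]
            calc pvK l j ≤ pvK l P := H1 P j hedge hjl hjS
              _ ≤ pvK l ((P-1)/2) := H1 ((P-1)/2) P hedgeGP (by omega) (by omega)
      · rw [if_neg hgt]
        rw [kS, kP] at hgt
        refine ⟨List.Perm.refl l, ?_⟩
        intro p j hpi hedge hjl
        by_cases hjS : j = S
        · subst hjS
          have hpP : p = P := by omega
          subst hpP
          omega
        · exact H1 p j hedge hjl hjS
    · rw [if_neg hs]
      refine ⟨List.Perm.refl l, ?_⟩
      intro p j hpi hedge hjl
      exact H1 p j hedge hjl (by omega)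

theorem customHeappush_spec (l : List (Int × Char)) (x : Int × Char) (h : pvHeapFrom l 0) :
    (customHeappush l x).Perm (l ++ [x]) ∧ pvHeapFrom (customHeappush l x) 0 := by
  simp only [customHeappush]
  have hsel : (((l ++ [x]).length : Int) - 1).toNat = l.length := by simp
  have hkeep : ∀ m : Nat, m < l.length → pvK (l ++ [x]) m = pvK l m := by
    intro m hm; unfold pvK; rw [List.getElem?_append_left hm]
  refine pushLoop_spec ((l ++ [x]).length + 1) (l ++ [x]) (((l ++ [x]).length : Int) - 1)
    (by simp) (by rw [hsel]; simp) (by rw [hsel]; simp) ?H1 ?H2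
  case H1 =>
    intro p j hedge hjl hjS
    rw [hsel] at hjS
    have hj : j < l.length := by simp at hjl; omega
    rw [hkeep j hj, hkeep p (by omega)]
    exact h p j (by omega) hedge hj
  case H2 =>
    intro hpos j hedge hjl
    rw [hsel] at hedge
    simp at hjl
    omega

theorem pv_foldl_isSome {α β : Type} (f : Option α → β → Option α)
    (hf : ∀ o x, (f o x).isSome = true ∨ (f o x) = f none x) :
    ∀ (t : List β) (o : Option α), (∀ x, (f none x).isSome = true) → o.isSome = true →
      (t.foldl f o).isSome = true := by
  intro t
  induction t with
  | nil => intro o _ h; simpa using h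
  | cons x xs ih =>
    intro o hnone h
    simp only [List.foldl_cons]
    rcases hf o x with h1 | h1
    · exact ih _ hnone h1
    · rw [h1]; exact ih _ hnone (hnone x)

theorem pv_max?_some (xs : List Int) (h : xs ≠ []) : ∃ m, PySem.List.max? xs id = some m := by
  obtain ⟨a, t, rfl⟩ := List.exists_cons_of_ne_nil h
  rw [← Option.isSome_iff_exists]
  unfold PySem.List.max?
  simp only [List.foldl_cons]
  apply pv_foldl_isSome
  · intro o x
    cases o with
    | none => right; rfl
    | some m => left; by_cases hc : m < x <;> simp [hc]
  · intro x; rfl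
  · rfl

theorem pvK_zero (l : List (Int × Char)) (h : l ≠ []) : pvK l 0 = (l.head h).1 := by
  obtain ⟨a, t, rfl⟩ := List.exists_cons_of_ne_nil h
  simp [pvK]

theorem loop_sim : ∀ (fuel : Nat) (hA : List (Int × Char)) (q : List (Int × Char))
    (out : List Char) (pool : List Int) (k : Int),
    pvHeapFrom hA 0 → (hA.map Prod.fst).Perm pool →
    ((pvLoopA fuel hA q out k).length : Int) =
      pvLoopB fuel pool (q.map Prod.fst) (out.length : Int) k := by
  intro fuel
  induction fuel with
  | zero => intro hA q out pool k hh hp; rfl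
  | succ fuel ih =>
    intro hA q out pool k hh hp
    rcases eq_or_ne hA [] with rfl | hne
    · have hpool : pool = [] := by
        have := hp.length_eq
        simp at this
        exact List.eq_nil_of_length_eq_zero this.symm
      subst hpool
      simp [pvLoopA, pvLoopB]
    · obtain ⟨a, t, rfl⟩ := List.exists_cons_of_ne_nil hne
      have hne' : pool ≠ [] := by
        intro h0
        subst h0
        simpa using hp.length_eq
      obtain ⟨hpop1, hpop2, hpop3⟩ := customHeappop_spec (a :: t) hne hh
      rw [List.head_cons] at hpop1
      rw [List.tail_cons] at hpop2
      obtain ⟨m0, hm0⟩ := pv_max?_some pool hne'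
      have hm0mem : m0 ∈ pool := PySem.List.max?_mem hm0
      have hm0eq : m0 = a.1 := by
        refine le_antisymm ?_ ?_
        · have hmem2 : m0 ∈ (a :: t).map Prod.fst := hp.mem_iff.mpr hm0mem
          obtain ⟨z, hz, hz2⟩ := List.mem_map.mp hmem2
          have h3 := fst_le_root (a :: t) hh z hz
          rw [pvK_zero (a :: t) hne, List.head_cons] at h3
          omega
        · exact PySem.List.max?_isMax hm0 a.1 (hp.mem_iff.mp (by simp))
      rw [hm0eq] at hm0 hm0mem
      have hrem : PySem.List.remove? pool a.1 = some (pool.erase a.1) :=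
        PySem.List.remove?_eq_some_erase pool a.1 hm0mem
      have herase : (pool.erase a.1).Perm (t.map Prod.fst) := by
        have h2 := hp.symm.erase a.1
        simpa using h2
      have hpool1 : ((customHeappop (a :: t)).2.map Prod.fst).Perm (pool.erase a.1) :=
        (hpop2.map Prod.fst).trans herase.symm
      simp only [pvLoopA, pvLoopB]
      rw [if_neg (by simp : ¬ (a :: t).isEmpty = true),
        if_neg (by simp [hne'] : ¬ pool.isEmpty = true)]
      rw [hpop1, hm0, Option.getD_some, hrem, Option.getD_some]
      have houtlen : ((out ++ [a.2]).length : Int) = (out.length : Int) + 1 := by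
        simp
      have hkB : (((q.map Prod.fst ++ [a.1 - 1]).length : Int) = k)
          ↔ (((q ++ [(a.1 - 1, a.2)]).length : Int) = k) := by simp
      by_cases hk : ((q ++ [(a.1 - 1, a.2)]).length : Int) = k
      · rw [if_pos hk, if_pos (hkB.mpr hk)]
        cases q with
        | nil =>
          simp only [List.map_nil, List.nil_append]
          by_cases hf : a.1 - 1 > 0
          · rw [if_pos hf, if_pos hf]
            have hpush := customHeappush_spec (customHeappop (a :: t)).2 (a.1 - 1, a.2) hpop3
            have hpp : ((customHeappush (customHeappop (a :: t)).2 (a.1 - 1, a.2)).map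
                Prod.fst).Perm (pool.erase a.1 ++ [a.1 - 1]) := by
              refine (hpush.1.map Prod.fst).trans ?_
              simp only [List.map_append, List.map_cons, List.map_nil]
              exact hpool1.append_right _
            have := ih (customHeappush (customHeappop (a :: t)).2 (a.1 - 1, a.2)) []
              (out ++ [a.2]) (pool.erase a.1 ++ [a.1 - 1]) k hpush.2 hpp
            simpa [houtlen] using this
          · rw [if_neg hf, if_neg hf]
            have := ih (customHeappop (a :: t)).2 [] (out ++ [a.2]) (pool.erase a.1) k
              hpop3 hpool1
            simpa [houtlen] using this
        | cons q0 q' =>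
          simp only [List.map_cons, List.cons_append]
          by_cases hf : q0.1 > 0
          · rw [if_pos hf, if_pos hf]
            have hpush := customHeappush_spec (customHeappop (a :: t)).2 q0 hpop3
            have hpp : ((customHeappush (customHeappop (a :: t)).2 q0).map
                Prod.fst).Perm (pool.erase a.1 ++ [q0.1]) := by
              refine (hpush.1.map Prod.fst).trans ?_
              simp only [List.map_append, List.map_cons, List.map_nil]
              exact hpool1.append_right _
            have := ih (customHeappush (customHeappop (a :: t)).2 q0) (q' ++ [(a.1 - 1, a.2)])
              (out ++ [a.2]) (pool.erase a.1 ++ [q0.1]) k hpush.2 hpp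
            simpa [houtlen] using this
          · rw [if_neg hf, if_neg hf]
            have := ih (customHeappop (a :: t)).2 (q' ++ [(a.1 - 1, a.2)]) (out ++ [a.2])
              (pool.erase a.1) k hpop3 hpool1
            simpa [houtlen] using this
      · rw [if_neg hk, if_neg (fun hc => hk (hkB.mp hc))]
        have := ih (customHeappop (a :: t)).2 (q ++ [(a.1 - 1, a.2)]) (out ++ [a.2])
          (pool.erase a.1) k hpop3 hpool1
        simpa [houtlen] using this

-- A's branchy count loop builds the same dict as B's get-based one
theorem counts_eq (cs : List Char) :
    cs.foldl
      (fun d c => if ¬ PySem.Dict.contains d c then d.insert c 1 else d.insert c (d.getD c 0 + 1))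
      (PySem.Dict.empty : PySem.Dict Char Int)
    = cs.foldl (fun d c => d.insert c (d.getD c 0 + 1)) (PySem.Dict.empty : PySem.Dict Char Int) := by
  have hfun : (fun (d : PySem.Dict Char Int) c => if ¬ PySem.Dict.contains d c then d.insert c 1 else d.insert c (d.getD c 0 + 1))
      = fun d c => d.insert c (d.getD c 0 + 1) := by
    funext d c
    by_cases hc : PySem.Dict.contains d c = true
    · simp [hc]
    · have : d.getD c 0 = 0 := PySem.Dict.getD_of_not_contains d 0 (by simpa using hc)
      simp [hc, this]
  exact congrArg (fun f : PySem.Dict Char Int → Char → PySem.Dict Char Int => cs.foldl f PySem.Dict.empty) hfun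

set_option maxHeartbeats 1000000 in
theorem isRearrangePossible_spec : Claim_equal_isRearrangePossible := by
  intro s k _
  unfold Spec_isRearrangePossible isRearrangePossible isRearrangePossible_alt
  rw [counts_eq]
  generalize s.toList = cs
  set counts := cs.foldl (fun d c => d.insert c (d.getD c 0 + 1))
    (PySem.Dict.empty : PySem.Dict Char Int) with hc
  by_cases h1 : counts.size = 1
  · simp [h1]
  · simp only [if_neg h1]
    have hspec := customHeapify_spec (counts.items.map (fun p => (p.2, p.1)))
    have hmap : ((counts.items.map (fun p => (p.2, p.1))).map Prod.fst) = counts.values := by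
      simp [PySem.Dict.values, List.map_map, Function.comp]
    have hperm : ((customHeapify (counts.items.map (fun p => (p.2, p.1)))).map Prod.fst).Perm
        counts.values := by
      rw [← hmap]
      exact hspec.1.map Prod.fst
    have hsim := loop_sim (cs.length + 1)
      (customHeapify (counts.items.map (fun p => (p.2, p.1)))) [] [] counts.values k
      hspec.2 hperm
    simp only [List.map_nil, List.length_nil, Nat.cast_zero] at hsim
    rw [← hsim]
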